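-- pv_equiv track=rewrite | github.com/awesomelistsio/awesome-list | .github/scripts/awesome_list_lint.py | strip_code_blocks
-- ===== SOURCE A (Python) =====
-- def strip_code_blocks(lines: list[str]) -> list[tuple[int, str]]:
--     in_code = False
--     out = []
--     for i, line in enumerate(lines, start=1):
--         if line.strip().startswith("```"):
--             in_code = not in_code
--             out.append((i, line))
--             continue
--         if not in_code:
--             out.append((i, line))
--     return out
-- ===== SOURCE B (Python) =====
-- def strip_code_blocks(lines: list[str]) -> list[tuple[int, str]]:
--     fence = [line.strip().startswith("```") for line in lines]
--     opens = []
--     c = 0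
--     for f in fence:
--         opens.append(c)
--         c += f
--     return [p for p, f, o in zip(enumerate(lines, 1), fence, opens)
--             if f or o % 2 == 0]
-- ===== Notes on version B (the rewrite author's own statement) =====
-- stated objective: alternative
-- what changed: Replaces A's streaming in_code boolean toggle with a map to fence flags, a prefix count of fences seen before each line, and a zip-based filter keeping fence lines and lines with an even open-fence count.
import Mathlib
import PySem

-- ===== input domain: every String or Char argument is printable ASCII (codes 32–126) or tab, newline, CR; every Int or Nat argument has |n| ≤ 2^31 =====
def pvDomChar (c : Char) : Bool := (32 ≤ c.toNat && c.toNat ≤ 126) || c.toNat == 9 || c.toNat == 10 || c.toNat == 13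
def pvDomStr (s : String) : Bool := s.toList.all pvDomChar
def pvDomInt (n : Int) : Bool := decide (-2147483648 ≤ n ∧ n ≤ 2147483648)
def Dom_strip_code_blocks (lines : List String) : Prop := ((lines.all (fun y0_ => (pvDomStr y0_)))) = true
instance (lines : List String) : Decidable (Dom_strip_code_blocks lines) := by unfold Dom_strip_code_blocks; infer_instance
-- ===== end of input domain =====

-- B replaces A's streaming in_code toggle by fence flags + a prefix count of fences + a zip filter; objective: alternative decomposition, same cost.

-- line.strip().startswith("```")
def pvFence (line : String) : Bool := PySem.Str.startswith (PySem.Str.strip line) "```"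

-- ===== PORT A =====
def strip_code_blocks (lines : List String) : List (Int × String) :=
  ((PySem.List.enumerate lines 1).foldl
    (fun (st : Bool × List (Int × String)) p =>
      if pvFence p.2 then (!st.1, st.2 ++ [p])
      else if !st.1 then (st.1, st.2 ++ [p])
      else st)
    (false, [])).2

-- ===== PORT B =====
def strip_code_blocks_alt (lines : List String) : List (Int × String) :=
  let fence := lines.map pvFence
  let opens := (fence.foldl
    (fun (st : List Int × Int) f => (st.1 ++ [st.2], st.2 + (if f then 1 else 0)))
    ([], 0)).1
  ((PySem.List.enumerate lines 1).zip (fence.zip opens)).filterMap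
    (fun q => if q.2.1 || (PySem.Int.mod q.2.2 2 == 0) then some q.1 else none)

-- ===== PRECONDITION & SPEC =====
def Spec_strip_code_blocks (lines : List String) (out : List (Int × String)) : Prop := out = strip_code_blocks_alt lines
instance (lines : List String) (out : List (Int × String)) : Decidable (Spec_strip_code_blocks lines out) := by unfold Spec_strip_code_blocks; infer_instance

-- ===== CLAIM (what is proved, stated in full; the proofs are below) =====
def Claim_equal_strip_code_blocks : Prop := ∀ (lines : List String), Dom_strip_code_blocks lines → Spec_strip_code_blocks lines (strip_code_blocks lines)

-- ===== LEMMAS AND PROOFS =====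

-- common reference recursion: A's toggle loop written structurally
def pvGo : Bool → Int → List String → List (Int × String)
  | _, _, [] => []
  | c, i, l :: ls =>
    if pvFence l then (i, l) :: pvGo (!c) (i + 1) ls
    else if c then pvGo c (i + 1) ls
    else (i, l) :: pvGo c (i + 1) ls

lemma pvA_go (ls : List String) : ∀ (i : Int) (c : Bool) (out : List (Int × String)),
    ((PySem.List.enumerate ls i).foldl
      (fun (st : Bool × List (Int × String)) p =>
        if pvFence p.2 then (!st.1, st.2 ++ [p])
        else if !st.1 then (st.1, st.2 ++ [p])
        else st)
      (c, out)).2 = out ++ pvGo c i ls := by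
  induction ls with
  | nil => intro i c out; simp [PySem.List.enumerate_nil, pvGo]
  | cons l ls ih =>
    intro i c out
    rw [PySem.List.enumerate_cons, List.foldl_cons]
    by_cases hf : pvFence l
    · simp only [hf, if_pos, ih, pvGo]; simp
    · cases c
      · simp only [hf, Bool.not_false, if_pos, ih, pvGo]; simp
      · simp only [hf, Bool.not_true, Bool.false_eq_true, ih, pvGo]; simp

-- the opens-building fold appends the running counts
def pvScan : Int → List Bool → List Int
  | _, [] => []
  | c, f :: fs => c :: pvScan (c + (if f then 1 else 0)) fs

lemma pvB_fold (fs : List Bool) : ∀ (acc : List Int) (c : Int),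
    (fs.foldl (fun (st : List Int × Int) f => (st.1 ++ [st.2], st.2 + (if f then 1 else 0))) (acc, c)).1
      = acc ++ pvScan c fs := by
  induction fs with
  | nil => intro acc c; simp [pvScan]
  | cons f fs ih =>
    intro acc c
    simp [List.foldl_cons, ih, pvScan]

lemma pvB_go (ls : List String) : ∀ (i : Int) (c : Int),
    ((PySem.List.enumerate ls i).zip ((ls.map pvFence).zip (pvScan c (ls.map pvFence)))).filterMap
        (fun q => if q.2.1 || (PySem.Int.mod q.2.2 2 == 0) then some q.1 else none)
      = pvGo (decide (PySem.Int.mod c 2 = 1)) i ls := by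
  induction ls with
  | nil => intro i c; simp [PySem.List.enumerate_nil, pvGo]
  | cons l ls ih =>
    intro i c
    rw [List.map_cons, PySem.List.enumerate_cons]
    simp only [pvScan, List.zip_cons_cons, List.filterMap_cons]
    have hm : PySem.Int.mod c 2 = c % 2 := PySem.Int.mod_eq_emod_of_pos (by norm_num)
    by_cases hf : pvFence l
    · have h1 : PySem.Int.mod (c + 1) 2 = (c + 1) % 2 := PySem.Int.mod_eq_emod_of_pos (by norm_num)
      have hpar : decide (PySem.Int.mod (c + 1) 2 = 1) = !decide (PySem.Int.mod c 2 = 1) := by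
        rw [hm, h1]
        rcases Int.emod_two_eq_zero_or_one c with h | h <;> simp [h] <;> omega
      simp only [hf, if_pos, pvGo, ih, hpar]
      simp
    · have hcase : (PySem.Int.mod c 2 == 0) = !decide (PySem.Int.mod c 2 = 1) := by
        rw [hm]; rcases Int.emod_two_eq_zero_or_one c with h | h <;> simp [h]
      by_cases hc : PySem.Int.mod c 2 = 1
      · have h0 : (PySem.Int.mod c 2 == 0) = false := by rw [hcase, hc]; simp
        simp only [h0, ih]
        rw [hm] at hc
        simp [pvGo, hf, hc]
      · have h0 : (PySem.Int.mod c 2 == 0) = true := by rw [hcase, decide_eq_false hc]; rfl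
        simp only [h0, ih]
        rw [hm] at hc
        simp only [pvGo, hf, Bool.false_eq_true, if_neg, not_false_iff]
        simp [hc]

-- ===== VERDICT (by name: the statement is the Claim_ definition above) =====
theorem strip_code_blocks_spec : Claim_equal_strip_code_blocks := by
  intro lines _
  unfold Spec_strip_code_blocks strip_code_blocks strip_code_blocks_alt
  rw [pvA_go]
  show _ = List.filterMap _ _
  rw [pvB_fold]
  simp only [List.nil_append]
  rw [pvB_go]
  simp
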